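-- pv_equiv track=rewrite | github.com/tursodatabase/turso-docs | scripts/sync-sql-reference.py | _escape_bare_angles
-- ===== SOURCE A (Python) =====
-- KNOWN_TAGS = {"Info", "Note", "Warning", "Tip", "Check", "Accordion", "AccordionGroup",
--               "Card", "CardGroup", "Tab", "Tabs", "CodeGroup", "code", "br", "hr",
--               "em", "strong", "sub", "sup", "a", "img", "table", "thead", "tbody",
--               "tr", "th", "td", "ul", "ol", "li", "p", "div", "span", "pre"}
--
-- def _escape_bare_angles(line: str) -> str:
--     """Escape < characters that would confuse MDX, skipping inline code spans."""
--     # Don't process lines that are markdown table headers (|---|)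
--     # Table cell < seems to be handled OK by mintlify, but let's be safe
--     # for content outside tables too.
--
--     parts = []
--     i = 0
--     in_backtick = False
--
--     while i < len(line):
--         ch = line[i]
--
--         # Toggle inline code spans
--         if ch == "`":
--             in_backtick = not in_backtick
--             parts.append(ch)
--             i += 1
--             continue
--
--         if in_backtick:
--             parts.append(ch)
--             i += 1
--             continue
--
--         if ch == "<":
--             # Check if this starts a known tag (or closing tag)
--             after = line[i + 1:] if i + 1 < len(line) else ""
--             if after.startswith("/"):
--                 after = after[1:]
--
--             # Check if it's a known component/HTML tag
--             is_known = False
--             for tag in KNOWN_TAGS: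
--                 if after.startswith(tag) and (
--                     len(after) == len(tag) or after[len(tag)] in " >\t\n/"
--                 ):
--                     is_known = True
--                     break
--
--             if is_known:
--                 parts.append(ch)
--             else:
--                 parts.append("&lt;")
--         else:
--             parts.append(ch)
--
--         i += 1
--
--     return "".join(parts)
-- ===== SOURCE B (Python) =====
-- KNOWN_TAGS = {"Info", "Note", "Warning", "Tip", "Check", "Accordion", "AccordionGroup",
--               "Card", "CardGroup", "Tab", "Tabs", "CodeGroup", "code", "br", "hr",
--               "em", "strong", "sub", "sup", "a", "img", "table", "thead", "tbody",
--               "tr", "th", "td", "ul", "ol", "li", "p", "div", "span", "pre"}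
--
--
-- def _escape_bare_angles(line: str) -> str:
--     """Escape < characters that would confuse MDX, skipping inline code spans."""
--
--     def bare(i: int) -> bool:
--         # A '<' is left alone inside an inline code span: that is exactly when
--         # the number of backticks before position i is odd.
--         if line.count("`", 0, i) % 2 == 1:
--             return False
--         # Extract the candidate tag name after '<' (optionally closing) and
--         # look it up in the tag set instead of scanning the set with startswith.
--         rest = line[i + 1:]
--         if rest[:1] == "/":
--             rest = rest[1:]
--         j = 0
--         while j < len(rest) and rest[j] not in " >\t\n/":
--             j += 1
--         return rest[:j] not in KNOWN_TAGS
--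
--     # pure per-index map: no carried state
--     return "".join("&lt;" if c == "<" and bare(i) else c for i, c in enumerate(line))
-- ===== Notes on version B (the rewrite author's own statement) =====
-- stated objective: alternative
-- what changed: Replaces A's stateful single pass (in_backtick toggle plus a startswith scan over the tag set at each angle bracket) by a stateless per-index map: an opening angle bracket is escaped iff the count of backticks before its position is even and the tag name extracted up to the first boundary character is not a member of KNOWN_TAGS.
import Mathlib
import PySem

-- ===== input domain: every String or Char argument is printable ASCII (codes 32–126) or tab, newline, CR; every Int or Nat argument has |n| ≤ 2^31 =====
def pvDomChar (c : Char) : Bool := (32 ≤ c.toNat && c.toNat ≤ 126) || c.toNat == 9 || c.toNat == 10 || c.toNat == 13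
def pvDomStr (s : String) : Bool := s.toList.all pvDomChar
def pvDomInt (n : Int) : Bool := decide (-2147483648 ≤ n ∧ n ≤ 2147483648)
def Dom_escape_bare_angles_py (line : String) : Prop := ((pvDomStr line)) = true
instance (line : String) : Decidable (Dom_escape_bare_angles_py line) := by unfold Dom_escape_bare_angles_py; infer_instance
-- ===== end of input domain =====

-- B replaces A's stateful toggle loop by a pure per-index map: an opening angle bracket is escaped
-- iff the backtick count before it is even and the extracted tag name is not in the set (objective: alternative).


def pyKnownTags : List (List Char) :=
  ["Info", "Note", "Warning", "Tip", "Check", "Accordion", "AccordionGroup",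
   "Card", "CardGroup", "Tab", "Tabs", "CodeGroup", "code", "br", "hr",
   "em", "strong", "sub", "sup", "a", "img", "table", "thead", "tbody",
   "tr", "th", "td", "ul", "ol", "li", "p", "div", "span", "pre"].map String.toList

-- the boundary character set " >\t\n/"
def pyDelim (c : Char) : Bool := c == ' ' || c == '>' || c == '\t' || c == '\n' || c == '/'

-- ===== PORT A =====
-- after.startswith(tag) and (len(after) == len(tag) or after[len(tag)] in " >\t\n/")
def pyTagOk (after tag : List Char) : Bool :=
  tag.isPrefixOf after &&
    (after.length == tag.length ||
      (match after[tag.length]? with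
       | some c => pyDelim c
       | none => false))

-- A's while loop: index i becomes the remaining char list, in_backtick carried along.
def escA : List Char → Bool → List Char
  | [], _ => []
  | ch :: rest, inb =>
    if ch = '`' then ch :: escA rest (!inb)
    else if inb then ch :: escA rest inb
    else if ch = '<' then
      let after := match rest with | '/' :: r => r | r => r
      let isKnown := pyKnownTags.any (fun tag => pyTagOk after tag)
      (if isKnown then [ch] else ['&', 'l', 't', ';']) ++ escA rest inb
    else ch :: escA rest inb

def escape_bare_angles_py (line : String) : String :=
  String.ofList (escA line.toList false)

-- ===== PORT B =====
-- Source B's bare(i): parity of backticks before i, then extract the tag name and look it up.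
def bBare (cs : List Char) (i : Nat) : Bool :=
  if (cs.take i).count '`' % 2 == 1 then false
  else
    let rest0 := cs.drop (i + 1)
    let rest := match rest0 with | '/' :: r => r | r => r
    let name := rest.takeWhile (fun c => !pyDelim c)
    !(pyKnownTags.contains name)

-- ''.join over enumerate(line): a pure map over (char, index) pairs, flattened
def escB (cs : List Char) : List Char :=
  ((cs.zipIdx).map (fun p =>
    if p.1 = '<' && bBare cs p.2 then ['&', 'l', 't', ';'] else [p.1])).flatten

def escape_bare_angles_py_alt (line : String) : String :=
  String.ofList (escB line.toList)

-- ===== PRECONDITION & SPEC =====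
def Spec_escape_bare_angles_py (line : String) (out : String) : Prop := out = escape_bare_angles_py_alt line
instance (line : String) (out : String) : Decidable (Spec_escape_bare_angles_py line out) := by unfold Spec_escape_bare_angles_py; infer_instance

-- ===== CLAIM (what is proved, stated in full; the proofs are below) =====
def Claim_equal_escape_bare_angles_py : Prop := ∀ (line : String), Dom_escape_bare_angles_py line → Spec_escape_bare_angles_py line (escape_bare_angles_py line)

-- ===== LEMMAS AND PROOFS =====

lemma any_congr_mem {α : Type} (l : List α) (f g : α → Bool)
    (h : ∀ a ∈ l, f a = g a) : l.any f = l.any g := by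
  induction l with
  | nil => rfl
  | cons x xs ih =>
    simp only [List.any_cons, h x (by simp), ih (fun a ha => h a (by simp [ha]))]

-- A's tag scan and B's name lookup agree, for tags free of boundary characters.
lemma tagOk_iff (tag : List Char) (h : tag.all (fun c => !pyDelim c) = true) :
    ∀ after : List Char,
      pyTagOk after tag = (after.takeWhile (fun c => !pyDelim c) == tag) := by
  induction tag with
  | nil =>
    intro after
    cases after with
    | nil => simp [pyTagOk]
    | cons a as =>
      by_cases hd : pyDelim a = true <;>
        simp [pyTagOk, hd]
  | cons t ts ih =>
    intro after
    simp only [List.all_cons, Bool.and_eq_true, Bool.not_eq_true'] at h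
    cases after with
    | nil => simp [pyTagOk]
    | cons a as =>
      by_cases hat : a = t
      · subst hat
        have := ih h.2 as
        simp only [pyTagOk] at this ⊢
        simp [h.1, ← this]
      · have hta : (t == a) = false := beq_eq_false_iff_ne.mpr (Ne.symm hat)
        have hat' : (a == t) = false := beq_eq_false_iff_ne.mpr hat
        by_cases hd : pyDelim a = true <;>
          simp [pyTagOk, hd, List.isPrefixOf, hta, hat']

lemma known_eq (after : List Char) :
    pyKnownTags.any (fun tag => pyTagOk after tag)
      = pyKnownTags.contains (after.takeWhile (fun c => !pyDelim c)) := by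
  have h : ∀ tag ∈ pyKnownTags, tag.all (fun c => !pyDelim c) = true := by decide
  rw [List.contains_eq_any_beq]
  refine any_congr_mem _ _ _ ?_
  intro tag hmem
  rw [tagOk_iff tag (h tag hmem) after]

-- main invariant: A's loop on the suffix, with in_backtick = parity of the backticks in
-- the prefix, equals B's stateless map over the suffix's (char, index) pairs.
lemma escA_eq_escB_aux (cs : List Char) :
    ∀ (suf pre : List Char) (b : Bool), cs = pre ++ suf →
      b = (pre.count '`' % 2 == 1) →
      escA suf b
        = ((suf.zipIdx pre.length).map (fun p =>
            if p.1 = '<' && bBare cs p.2 then ['&', 'l', 't', ';'] else [p.1])).flatten := by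
  intro suf
  induction suf with
  | nil => intro pre b _ _; simp [escA]
  | cons c rest ih =>
    intro pre b hcs hb
    have htake : cs.take pre.length = pre := by rw [hcs]; exact List.take_left ..
    have hdrop : cs.drop (pre.length + 1) = rest := by
      have h2 : cs = (pre ++ [c]) ++ rest := by simp [hcs]
      rw [h2]
      simpa using List.drop_left (pre ++ [c]) rest
    rw [List.zipIdx_cons, List.map_cons, List.flatten_cons]
    by_cases hbk : c = '`'
    · subst hbk
      have hparity : (!b) = ((pre ++ ['`']).count '`' % 2 == 1) := by
        rw [hb]
        rcases Nat.mod_two_eq_zero_or_one (pre.count '`') with h2 | h2 <;>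
          simp [List.count_append, Nat.add_mod, h2]
      have ihc := ih (pre ++ ['`']) (!b) (by simp [hcs]) hparity
      simp only [List.length_append, List.length_cons, List.length_nil] at ihc
      simp [escA, ihc]
    · have hcount : (pre ++ [c]).count '`' = pre.count '`' := by simp [hbk]
      have ihc := ih (pre ++ [c]) b (by simp [hcs]) (by rw [hb, hcount])
      simp only [List.length_append, List.length_cons, List.length_nil] at ihc
      by_cases hp : ((pre.count '`' % 2 == 1) : Bool) = true
      · have hb' : b = true := by rw [hb, hp]
        subst hb'
        have hbare : bBare cs pre.length = false := by
          simp [bBare, htake, hp]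
        simp [escA, hbk, ihc, hbare]
      · have hp' : ((pre.count '`' % 2 == 1) : Bool) = false := Bool.eq_false_iff.mpr hp
        have hb' : b = false := by rw [hb, hp']
        subst hb'
        by_cases hlt : c = '<'
        · subst hlt
          have hbare : bBare cs pre.length
              = !(pyKnownTags.contains
                  ((match rest with | '/' :: r => r | r => r).takeWhile
                    (fun c => !pyDelim c))) := by
            simp [bBare, htake, hp', hdrop]
          simp only [escA, if_neg (by decide : ¬('<' = '`')), Bool.false_eq_true,
            known_eq, ihc, hbare]
          by_cases hk : pyKnownTags.contains
              ((match rest with | '/' :: r => r | r => r).takeWhile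
                (fun c => !pyDelim c)) = true <;> simp [hk]
        · simp [escA, hbk, hlt, ihc]

-- ===== VERDICT (by name: the statement is the Claim_ definition above) =====
theorem escape_bare_angles_py_spec : Claim_equal_escape_bare_angles_py := by
  intro line _
  unfold Spec_escape_bare_angles_py escape_bare_angles_py escape_bare_angles_py_alt escB
  have h := escA_eq_escB_aux line.toList line.toList [] false (by simp) rfl
  simp only [List.length_nil] at h
  rw [h]
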